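-- pv_equiv track=rewrite | github.com/lordmir/landstalker_tools_python | tools/codecs/tilemap3d.py | _get_tile_counts
-- ===== SOURCE A (Python) =====
-- from collections import defaultdict
--
-- def _get_tile_counts(tiles: list[str], compressed: list[bool]) -> tuple[defaultdict[int], defaultdict[int]]:
--     """Gets tile pattern counts from uncompressed tiles.
--
--     Args:
--         tiles (List[int]): The tile values.
--         compressed (List[bool]): Flags for compressed tiles.
--
--     Returns:
--         Tuple[DefaultDict[int, int], DefaultDict[int, int]]:
--             Incrementing and range tile counts.
--     """
--     incrementing_tile_counts = defaultdict(int)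
--     ranged_tile_counts = defaultdict(int)
--
--     for i, tile in enumerate(tiles):
--         if not compressed[i]:
--             for base, count in incrementing_tile_counts.items():
--                 if tile == base + count:
--                     incrementing_tile_counts[base] += 1
--                 if base <= tile < base + count:
--                     ranged_tile_counts[tile] += 1
--             incrementing_tile_counts.setdefault(tile, 1)
--
--     return incrementing_tile_counts, ranged_tile_counts
-- ===== SOURCE B (Python) =====
-- def _get_tile_counts(tiles, compressed):
--     """One pass with an expectation index and a coverage counter instead of
--     rescanning all runs for every tile."""
--     incrementing_tile_counts = {}
--     ranged_tile_counts = {}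
--     expect = {}   # value v -> list of bases whose run is extended by v
--     cover = {}    # value v -> how many runs currently cover v (base <= v < base+count)
--     for i, tile in enumerate(tiles):
--         if compressed[i]:
--             continue
--         hits = cover.get(tile, 0)
--         if hits:
--             ranged_tile_counts[tile] = ranged_tile_counts.get(tile, 0) + hits
--         bases = expect.pop(tile, [])
--         for b in bases:
--             incrementing_tile_counts[b] += 1
--             expect.setdefault(b + incrementing_tile_counts[b], []).append(b)
--         if bases:
--             # each extended run now also covers this tile value
--             cover[tile] = cover.get(tile, 0) + len(bases)
--         if tile not in incrementing_tile_counts: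
--             incrementing_tile_counts[tile] = 1
--             expect.setdefault(tile + 1, []).append(tile)
--             cover[tile] = cover.get(tile, 0) + 1
--     return incrementing_tile_counts, ranged_tile_counts
-- ===== Notes on version B (the rewrite author's own statement) =====
-- stated objective: faster
-- what changed: Instead of rescanning every known run for each uncompressed tile, B keeps a dict keyed by the value each run expects next (so extensions are found by one lookup) and a per-value coverage counter (so the ranged count is one lookup), updating both incrementally.
import Mathlib
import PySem

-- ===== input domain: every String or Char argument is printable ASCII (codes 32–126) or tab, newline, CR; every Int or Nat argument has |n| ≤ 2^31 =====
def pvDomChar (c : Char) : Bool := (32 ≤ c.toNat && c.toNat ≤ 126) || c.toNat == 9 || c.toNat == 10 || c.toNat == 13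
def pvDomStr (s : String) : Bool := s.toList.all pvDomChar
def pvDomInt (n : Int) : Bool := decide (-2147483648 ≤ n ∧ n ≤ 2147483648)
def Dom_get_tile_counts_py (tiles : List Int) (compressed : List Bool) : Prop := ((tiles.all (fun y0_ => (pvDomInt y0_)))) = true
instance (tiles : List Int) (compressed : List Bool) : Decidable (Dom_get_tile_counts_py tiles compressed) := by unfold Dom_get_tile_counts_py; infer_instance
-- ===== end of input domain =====

-- B replaces A's rescan of every known run at every tile by an index keyed on the
-- value each run expects next plus a point-coverage counter (objective: faster).

-- ===== PORT A =====
-- inner loop body: 'for base, count in incrementing_tile_counts.items(): …'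
def pvAInner (tile : Int) (s : PySem.Dict Int Int × PySem.Dict Int Int) (bc : Int × Int) :
    PySem.Dict Int Int × PySem.Dict Int Int :=
  let s1 := if tile = bc.1 + bc.2 then (s.1.modify bc.1 0 (· + 1), s.2) else s
  if bc.1 ≤ tile ∧ tile < bc.1 + bc.2 then (s1.1, s1.2.modify tile 0 (· + 1)) else s1

-- one iteration of 'for i, tile in enumerate(tiles)'; 'compressed[i]' is in range for
-- every reached i exactly when Pre_ holds, so the '.getD false' default is unreachable under Pre_
def pvAStep (compressed : List Bool) (st : PySem.Dict Int Int × PySem.Dict Int Int) (p : Int × Int) :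
    PySem.Dict Int Int × PySem.Dict Int Int :=
  if (PySem.List.pyGet? compressed p.1).getD false then st
  else
    let tile := p.2
    let st2 := st.1.items.foldl (pvAInner tile) st
    (st2.1.setdefault tile 1, st2.2)

def get_tile_counts_py (tiles : List Int) (compressed : List Bool) :
    (List (Int × Int)) × (List (Int × Int)) :=
  let fin := (PySem.List.enumerate tiles).foldl (pvAStep compressed) (PySem.Dict.empty, PySem.Dict.empty)
  (fin.1.items, fin.2.items)

-- ===== PORT B =====
-- B's state: (incrementing_tile_counts, ranged_tile_counts, expect, cover)
abbrev pvBSt := PySem.Dict Int Int × PySem.Dict Int Int × PySem.Dict Int (List Int) × PySem.Dict Int Int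

-- body of 'for b in bases: inc[b] += 1; expect.setdefault(b + inc[b], []).append(b)'
-- ('inc[b]' reads an existing key; its port reads with default 0, never taken)
def pvBExt (q : PySem.Dict Int Int × PySem.Dict Int (List Int)) (b : Int) :
    PySem.Dict Int Int × PySem.Dict Int (List Int) :=
  let c := q.1.getD b 0 + 1
  (q.1.insert b c, q.2.insert (b + c) (q.2.getD (b + c) [] ++ [b]))

def pvBStep (compressed : List Bool) (st : pvBSt) (p : Int × Int) : pvBSt :=
  if (PySem.List.pyGet? compressed p.1).getD false then st
  else
    let tile := p.2
    let ⟨inc, rng, expect, cover⟩ := st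
    let hits := cover.getD tile 0
    let rng := if hits ≠ 0 then rng.insert tile (rng.getD tile 0 + hits) else rng
    let bases := expect.getD tile []
    let expect := expect.erase tile        -- 'expect.pop(tile, [])'
    let ie := bases.foldl pvBExt (inc, expect)
    let cover := if bases ≠ [] then cover.insert tile (cover.getD tile 0 + bases.length) else cover
    if ie.1.contains tile = false then
      (ie.1.insert tile 1, rng, ie.2.insert (tile + 1) (ie.2.getD (tile + 1) [] ++ [tile]),
        cover.insert tile (cover.getD tile 0 + 1))
    else (ie.1, rng, ie.2, cover)

def get_tile_counts_py_alt (tiles : List Int) (compressed : List Bool) :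
    (List (Int × Int)) × (List (Int × Int)) :=
  let fin := (PySem.List.enumerate tiles).foldl (pvBStep compressed)
    (PySem.Dict.empty, PySem.Dict.empty, PySem.Dict.empty, PySem.Dict.empty)
  (fin.1.items, fin.2.1.items)

-- ===== PRECONDITION & SPEC =====
-- Pre_ excludes exactly the inputs on which Python A raises IndexError:
-- 'compressed[i]' with len(compressed) < len(tiles).
def Pre_get_tile_counts_py (tiles : List Int) (compressed : List Bool) : Prop :=
  tiles.length ≤ compressed.length
instance (tiles : List Int) (compressed : List Bool) : Decidable (Pre_get_tile_counts_py tiles compressed) := by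
  unfold Pre_get_tile_counts_py; infer_instance

def pvWitness_get_tile_counts_py : List Int × List Bool :=
  ([3, 4, 3, 5, 4], [false, false, false, false, false])

def Spec_get_tile_counts_py (tiles : List Int) (compressed : List Bool)
    (out : (List (Int × Int)) × (List (Int × Int))) : Prop :=
  out = get_tile_counts_py_alt tiles compressed
instance (tiles : List Int) (compressed : List Bool) (out : (List (Int × Int)) × (List (Int × Int))) :
    Decidable (Spec_get_tile_counts_py tiles compressed out) := by
  unfold Spec_get_tile_counts_py; infer_instance

-- ===== CLAIM (what is proved, stated in full; the proofs are below) =====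
def Claim_equal_get_tile_counts_py : Prop := ∀ (tiles : List Int) (compressed : List Bool), Dom_get_tile_counts_py tiles compressed → Pre_get_tile_counts_py tiles compressed → Spec_get_tile_counts_py tiles compressed (get_tile_counts_py tiles compressed)

-- ===== LEMMAS AND PROOFS =====

-- how one uncompressed tile transforms a run (base, count)
def pvRun (tile : Int) (bc : Int × Int) : Int × Int :=
  if tile = bc.1 + bc.2 then (bc.1, bc.2 + 1) else bc

-- number of runs covering value v
def pvHits (v : Int) (l : List (Int × Int)) : Nat :=
  (l.filter (fun bc => decide (bc.1 ≤ v ∧ v < bc.1 + bc.2))).length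

-- bases of runs expecting value v next
def pvExt (v : Int) (l : List (Int × Int)) : List Int :=
  (l.filter (fun bc => decide (v = bc.1 + bc.2))).map (·.1)

-- the simulation invariant between A's state and B's state
def pvInv (a : PySem.Dict Int Int × PySem.Dict Int Int) (b : pvBSt) : Prop :=
  b.1 = a.1 ∧ b.2.1 = a.2 ∧
  a.1.keys.Nodup ∧
  (∀ bc ∈ a.1.items, 1 ≤ bc.2) ∧
  (∀ v : Int, (b.2.2.1.getD v []).Nodup ∧
      (∀ x : Int, x ∈ b.2.2.1.getD v [] ↔ x ∈ pvExt v a.1.items)) ∧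
  (∀ v : Int, b.2.2.2.getD v 0 = (pvHits v a.1.items : Int))

-- how A's rng accumulates hits for one tile
def pvRngUpd (r : PySem.Dict Int Int) (tile : Int) (h : Nat) : PySem.Dict Int Int :=
  if h = 0 then r else r.insert tile (r.getD tile 0 + h)

theorem pvRun_fst (t : Int) (bc : Int × Int) : (pvRun t bc).1 = bc.1 := by
  unfold pvRun; split <;> rfl

theorem pv_mem_pvExt (v x : Int) (l : List (Int × Int)) :
    x ∈ pvExt v l ↔ ∃ c, (x, c) ∈ l ∧ v = x + c := by
  constructor
  · intro hx
    simp only [pvExt, List.mem_map, List.mem_filter] at hx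
    obtain ⟨bc, ⟨hm, he⟩, rfl⟩ := hx
    exact ⟨bc.2, hm, by simpa using he⟩
  · rintro ⟨c, hm, he⟩
    simp only [pvExt, List.mem_map, List.mem_filter]
    exact ⟨(x, c), ⟨hm, by simpa using he⟩, rfl⟩

theorem pv_fst_eq (l : List (Int × Int)) (h : (l.map (·.1)).Nodup) {bc bc' : Int × Int}
    (h1 : bc ∈ l) (h2 : bc' ∈ l) (he : bc.1 = bc'.1) : bc = bc' :=
  List.inj_on_of_nodup_map h h1 h2 he

theorem pvExt_nodup (v : Int) (l : List (Int × Int)) (h : (l.map (·.1)).Nodup) :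
    (pvExt v l).Nodup := by
  have hs : (pvExt v l).Sublist (l.map (·.1)) := by
    unfold pvExt
    exact List.Sublist.map _ List.filter_sublist
  exact hs.nodup h

theorem pvRngUpd_comp (r : PySem.Dict Int Int) (t : Int) (h1 h2 : Nat) :
    pvRngUpd (pvRngUpd r t h1) t h2 = pvRngUpd r t (h1 + h2) := by
  unfold pvRngUpd
  rcases Nat.eq_zero_or_pos h1 with h1z | h1p
  · subst h1z; simp
  rcases Nat.eq_zero_or_pos h2 with h2z | h2p
  · subst h2z; simp [Nat.pos_iff_ne_zero.mp h1p]
  rw [if_neg (Nat.pos_iff_ne_zero.mp h1p), if_neg (Nat.pos_iff_ne_zero.mp h2p),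
    if_neg (by omega)]
  rw [PySem.Dict.insert_insert_self, PySem.Dict.getD_insert_self]
  congr 1
  push_cast
  ring

theorem pv_find_filter_ne (k k' : Int) (hne : k' ≠ k) (l : List (Int × List Int)) :
    List.find? (fun p => p.1 == k') (l.filter (fun p => !(p.1 == k))) =
      List.find? (fun p => p.1 == k') l := by
  induction l with
  | nil => rfl
  | cons a tl ih =>
    by_cases ha : a.1 = k
    · rw [List.filter_cons_of_neg (by simp [ha]), ih,
        List.find?_cons_of_neg (by simp [ha, Ne.symm hne])]
    · rw [List.filter_cons_of_pos (by simp [ha])]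
      by_cases ha' : a.1 = k'
      · rw [List.find?_cons_of_pos (by simp [ha']), List.find?_cons_of_pos (by simp [ha'])]
      · rw [List.find?_cons_of_neg (by simp [ha']), List.find?_cons_of_neg (by simp [ha']), ih]

theorem pv_getD_erase (d : PySem.Dict Int (List Int)) (k k' : Int) :
    (d.erase k).getD k' [] = if k' = k then [] else d.getD k' [] := by
  unfold PySem.Dict.erase PySem.Dict.getD PySem.Dict.get?
  by_cases hk : k' = k
  · rw [if_pos hk]
    have : List.find? (fun p => p.1 == k') (d.items.filter (fun p => !(p.1 == k))) = none := by
      rw [List.find?_eq_none]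
      intro x hx
      simp only [List.mem_filter] at hx
      simpa [hk] using hx.2
    simp [this]
  · rw [if_neg hk]
    simp only
    rw [pv_find_filter_ne k k' hk]

theorem pv_map_replace (X Y : List (Int × Int)) (k w v : Int)
    (hX : k ∉ X.map (·.1)) (hY : k ∉ Y.map (·.1)) :
    (X ++ (k, w) :: Y).map (fun p => if p.1 == k then (k, v) else p) = X ++ (k, v) :: Y := by
  rw [List.map_append, List.map_cons]
  have hmap : ∀ (Z : List (Int × Int)), k ∉ Z.map (·.1) →
      Z.map (fun p => if p.1 == k then (k, v) else p) = Z := by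
    intro Z hZ
    refine (List.map_congr_left ?_).trans (List.map_id _)
    intro a ha
    have : a.1 ≠ k := fun hc => hZ (hc ▸ List.mem_map_of_mem ha)
    simp [this]
  rw [hmap X hX, hmap Y hY]
  simp

theorem pv_countP_or (l : List (Int × Int)) (p q : Int × Int → Bool)
    (hd : ∀ x ∈ l, ¬(p x = true ∧ q x = true)) :
    l.countP (fun x => p x || q x) = l.countP p + l.countP q := by
  induction l with
  | nil => simp
  | cons a tl ih =>
    have ha := hd a (List.mem_cons_self ..)
    have ih' := ih (fun x hx => hd x (List.mem_cons_of_mem _ hx))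
    by_cases hp : p a = true
    · have hq : ¬ q a = true := fun h => ha ⟨hp, h⟩
      simp only [List.countP_cons, hp, hq, ih']
      simp; omega
    · simp only [List.countP_cons, hp, ih']
      by_cases hq : q a = true <;> simp [hq] <;> omega

-- hits after one tile's extensions
theorem pvHits_map (v tile : Int) (l : List (Int × Int)) (hc : ∀ bc ∈ l, 1 ≤ bc.2) :
    pvHits v (l.map (pvRun tile)) =
      pvHits v l + (if v = tile then (pvExt tile l).length else 0) := by
  unfold pvHits
  rw [← List.countP_eq_length_filter, ← List.countP_eq_length_filter, List.countP_map]
  have hcg : l.countP ((fun bc => decide (bc.1 ≤ v ∧ v < bc.1 + bc.2)) ∘ pvRun tile) =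
      l.countP (fun bc => (decide (bc.1 ≤ v ∧ v < bc.1 + bc.2)) ||
        (decide (v = tile ∧ tile = bc.1 + bc.2))) := by
    apply List.countP_congr
    intro bc hbc
    have hc1 := hc bc hbc
    simp only [Function.comp_apply, pvRun, Bool.or_eq_true]
    by_cases he : tile = bc.1 + bc.2
    · simp only [if_pos he, decide_eq_true_eq]
      omega
    · simp only [if_neg he, decide_eq_true_eq]
      omega
  rw [hcg, pv_countP_or l _ _ (by
    intro x hx
    simp only [decide_eq_true_eq]
    omega)]
  congr 1
  by_cases hv : v = tile
  · subst hv
    rw [if_pos rfl]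
    unfold pvExt
    rw [List.length_map, ← List.countP_eq_length_filter]
    apply List.countP_congr
    intro bc _
    simp
  · rw [if_neg hv]
    exact List.countP_eq_zero.mpr (fun a _ => by
      simp only [decide_eq_true_eq]
      omega)

theorem pvHits_append_new (v tile : Int) (l : List (Int × Int)) :
    pvHits v (l ++ [(tile, 1)]) = pvHits v l + (if v = tile then 1 else 0) := by
  unfold pvHits
  rw [List.filter_append, List.length_append]
  congr 1
  by_cases hv : v = tile
  · rw [if_pos hv]
    subst hv
    simp [show v < v + 1 by omega]
  · rw [if_neg hv]
    simp only [List.length_eq_zero_iff, List.filter_eq_nil_iff]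
    intro a ha
    simp only [List.mem_singleton] at ha
    subst ha
    simp only [decide_eq_true_eq, not_and]
    omega

theorem pv_mem_ext_map (v tile x : Int) (l : List (Int × Int)) :
    x ∈ pvExt v (l.map (pvRun tile)) ↔
      (v ≠ tile ∧ x ∈ pvExt v l) ∨ (v = tile + 1 ∧ x ∈ pvExt tile l) := by
  constructor
  · intro hx
    rw [pv_mem_pvExt] at hx
    obtain ⟨c, hm, he⟩ := hx
    rw [List.mem_map] at hm
    obtain ⟨bc, hbc, hrun⟩ := hm
    unfold pvRun at hrun
    by_cases ht : tile = bc.1 + bc.2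
    · rw [if_pos ht] at hrun
      injection hrun with h1 h2
      subst h1
      right
      refine ⟨by omega, (pv_mem_pvExt _ _ _).mpr ⟨bc.2, hbc, ht⟩⟩
    · rw [if_neg ht] at hrun
      subst hrun
      left
      exact ⟨by omega, (pv_mem_pvExt _ _ _).mpr ⟨c, hbc, he⟩⟩
  · rintro (⟨hv, hx⟩ | ⟨hv, hx⟩)
    · rw [pv_mem_pvExt] at hx ⊢
      obtain ⟨c, hm, he⟩ := hx
      refine ⟨c, ?_, he⟩
      rw [List.mem_map]
      refine ⟨(x, c), hm, ?_⟩
      unfold pvRun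
      rw [if_neg (by omega)]
    · rw [pv_mem_pvExt] at hx ⊢
      obtain ⟨c, hm, he⟩ := hx
      refine ⟨c + 1, ?_, by omega⟩
      rw [List.mem_map]
      refine ⟨(x, c), hm, ?_⟩
      unfold pvRun
      rw [if_pos (by omega)]

theorem pv_map_fst_map_run (tile : Int) (l : List (Int × Int)) :
    (l.map (pvRun tile)).map (·.1) = l.map (·.1) := by
  rw [List.map_map]
  exact List.map_congr_left (fun a _ => pvRun_fst tile a)

-- A's inner loop over the items snapshot, characterized
theorem pvAInner_fold (tile : Int) :
    ∀ (R P : List (Int × Int)) (d r : PySem.Dict Int Int),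
      (((P ++ R).map (·.1)).Nodup) →
      d.items = P.map (pvRun tile) ++ R →
      ((R.foldl (pvAInner tile) (d, r)).1.items = P.map (pvRun tile) ++ R.map (pvRun tile) ∧
       (R.foldl (pvAInner tile) (d, r)).2 = pvRngUpd r tile (pvHits tile R))
  | [], P, d, r, hnd, hd => by
      refine ⟨by simpa using hd, by simp [pvHits, pvRngUpd]⟩
  | ⟨bk, cv⟩ :: R, P, d, r, hnd, hd => by
      have hnd' : (P.map (·.1) ++ bk :: R.map (·.1)).Nodup := by simpa using hnd
      obtain ⟨hndP, hndc, hdisj⟩ := List.nodup_append.mp hnd'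
      have hPn : bk ∉ P.map (·.1) := fun hm => hdisj bk hm bk (List.mem_cons_self ..) rfl
      have hRn : bk ∉ R.map (·.1) := (List.nodup_cons.mp hndc).1
      have hkeysd : d.keys = P.map (·.1) ++ bk :: R.map (·.1) := by
        show d.items.map (·.1) = _
        rw [hd, List.map_append, List.map_map, List.map_cons]
        congr 1
        exact List.map_congr_left (fun a _ => pvRun_fst tile a)
      have hknd : d.keys.Nodup := by rw [hkeysd]; exact hnd'
      have hmem : (bk, cv) ∈ d.items := by
        rw [hd]; exact List.mem_append_right _ (List.mem_cons_self ..)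
      have hget : d.getD bk 0 = cv := PySem.Dict.getD_of_mem_items _ hmem hknd 0
      have hcont : d.contains bk = true := by
        rw [PySem.Dict.contains_iff_mem_keys, hkeysd]
        simp
      have hndrec : (((P ++ [(bk, cv)]) ++ R).map (·.1)).Nodup := by
        simpa [List.append_assoc] using hnd
      rw [List.foldl_cons]
      by_cases hext : tile = bk + cv
      · have hcov : ¬(bk ≤ tile ∧ tile < bk + cv) := by omega
        have hstep : pvAInner tile (d, r) (bk, cv) = (d.insert bk (cv + 1), r) := by
          simp only [pvAInner, if_pos hext, if_neg hcov]
          unfold PySem.Dict.modify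
          rw [hget]
        have hd1 : (d.insert bk (cv + 1)).items = (P ++ [(bk, cv)]).map (pvRun tile) ++ R := by
          rw [PySem.Dict.items_insert_of_contains _ _ hcont, hd,
            pv_map_replace (P.map (pvRun tile)) R bk cv (cv + 1)
              (by rw [pv_map_fst_map_run]; exact hPn) hRn,
            List.map_append]
          simp [pvRun, hext]
        obtain ⟨h1, h2⟩ := pvAInner_fold tile R (P ++ [(bk, cv)]) _ r hndrec hd1
        rw [hstep]
        refine ⟨?_, ?_⟩
        · rw [h1, List.map_append, List.append_assoc, List.map_cons]
          simp
        · rw [h2]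
          have : pvHits tile ((bk, cv) :: R) = pvHits tile R := by
            unfold pvHits
            rw [List.filter_cons_of_neg (by simpa using hcov)]
          rw [this]
      · have hrunid : pvRun tile (bk, cv) = (bk, cv) := by simp [pvRun, hext]
        have hd1 : d.items = (P ++ [(bk, cv)]).map (pvRun tile) ++ R := by
          rw [hd, List.map_append]
          simp [hrunid]
        by_cases hcov : bk ≤ tile ∧ tile < bk + cv
        · have hstep : pvAInner tile (d, r) (bk, cv) = (d, pvRngUpd r tile 1) := by
            simp only [pvAInner, if_neg hext, if_pos hcov]
            unfold pvRngUpd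
            rw [if_neg one_ne_zero]
            unfold PySem.Dict.modify
            norm_num
          obtain ⟨h1, h2⟩ := pvAInner_fold tile R (P ++ [(bk, cv)]) d (pvRngUpd r tile 1) hndrec hd1
          rw [hstep]
          refine ⟨?_, ?_⟩
          · rw [h1, List.map_append, List.append_assoc, List.map_cons]
            simp [hrunid]
          · rw [h2, pvRngUpd_comp]
            have : pvHits tile ((bk, cv) :: R) = 1 + pvHits tile R := by
              unfold pvHits
              rw [List.filter_cons_of_pos (by simpa using hcov)]
              simp [Nat.add_comm]
            rw [this]
        · have hstep : pvAInner tile (d, r) (bk, cv) = (d, r) := by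
            simp only [pvAInner, if_neg hext, if_neg hcov]
          obtain ⟨h1, h2⟩ := pvAInner_fold tile R (P ++ [(bk, cv)]) d r hndrec hd1
          rw [hstep]
          refine ⟨?_, ?_⟩
          · rw [h1, List.map_append, List.append_assoc, List.map_cons]
            simp [hrunid]
          · rw [h2]
            have : pvHits tile ((bk, cv) :: R) = pvHits tile R := by
              unfold pvHits
              rw [List.filter_cons_of_neg (by simpa using hcov)]
            rw [this]

-- B's extension loop, characterized
theorem pvBExt_fold (tile : Int) :
    ∀ (L : List Int) (d : PySem.Dict Int Int) (E : PySem.Dict Int (List Int)),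
      L.Nodup → d.keys.Nodup →
      (∀ b ∈ L, d.get? b = some (tile - b)) →
      ((L.foldl pvBExt (d, E)).1.items =
        d.items.map (fun bc => if bc.1 ∈ L then (bc.1, bc.2 + 1) else bc) ∧
       (L.foldl pvBExt (d, E)).2 =
        (if L = [] then E else E.insert (tile + 1) (E.getD (tile + 1) [] ++ L)))
  | [], d, E, _, _, _ => by simp
  | b :: L, d, E, hL, hknd, hget => by
    obtain ⟨hbL, hLnd⟩ := List.nodup_cons.mp hL
    have hgb : d.getD b 0 = tile - b := by
      rw [PySem.Dict.getD_eq_get?_getD, hget b (List.mem_cons_self ..)]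
      rfl
    have hkey : b + (d.getD b 0 + 1) = tile + 1 := by rw [hgb]; ring
    have hstep : pvBExt (d, E) b =
        (d.insert b (tile - b + 1), E.insert (tile + 1) (E.getD (tile + 1) [] ++ [b])) := by
      show (d.insert b (d.getD b 0 + 1),
        E.insert (b + (d.getD b 0 + 1)) (E.getD (b + (d.getD b 0 + 1)) [] ++ [b])) = _
      rw [hgb, show b + (tile - b + 1) = tile + 1 from by ring]
    have hcont : d.contains b = true := by
      by_contra hc
      have : d.get? b = none := (PySem.Dict.get?_eq_none_iff_contains d b).mpr
        (by revert hc; cases d.contains b <;> simp)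
      rw [hget b (List.mem_cons_self ..)] at this
      cases this
    rw [List.foldl_cons, hstep]
    have hknd' : (d.insert b (tile - b + 1)).keys.Nodup := PySem.Dict.nodup_keys_insert d b _ hknd
    have hget' : ∀ x ∈ L, (d.insert b (tile - b + 1)).get? x = some (tile - x) := by
      intro x hx
      rw [PySem.Dict.get?_insert_of_ne _ _ (fun h : x = b => hbL (h ▸ hx))]
      exact hget x (List.mem_cons_of_mem _ hx)
    obtain ⟨h1, h2⟩ := pvBExt_fold tile L (d.insert b (tile - b + 1)) _ hLnd hknd' hget'
    refine ⟨?_, ?_⟩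
    · rw [h1, PySem.Dict.items_insert_of_contains _ _ hcont, List.map_map]
      apply List.map_congr_left
      rintro ⟨p1, p2⟩ hp
      by_cases hpb : p1 = b
      · subst hpb
        have hg := PySem.Dict.get?_of_mem_items (d := d) (k := p1) (v := p2) hp hknd
        rw [hget p1 (List.mem_cons_self ..)] at hg
        have hpv : p2 = tile - p1 := (Option.some_inj.mp hg).symm
        subst hpv
        simp [hbL]
      · simp only [Function.comp_apply, beq_iff_eq, hpb, if_false]
        by_cases hpL : p1 ∈ L
        · rw [if_pos hpL, if_pos (List.mem_cons_of_mem _ hpL)]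
        · rw [if_neg hpL, if_neg (by simp [hpb, hpL])]
    · rw [h2]
      by_cases hLe : L = []
      · subst hLe
        simp
      · rw [if_neg hLe, if_neg (by simp)]
        rw [PySem.Dict.getD_insert_self, PySem.Dict.insert_insert_self]
        simp

theorem pv_mem_ext_append (v tile x : Int) (l : List (Int × Int)) :
    x ∈ pvExt v (l ++ [(tile, 1)]) ↔ x ∈ pvExt v l ∨ (v = tile + 1 ∧ x = tile) := by
  rw [pv_mem_pvExt]
  constructor
  · rintro ⟨c, hm, he⟩
    rcases List.mem_append.mp hm with hm' | hm'
    · exact Or.inl ((pv_mem_pvExt v x l).mpr ⟨c, hm', he⟩)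
    · simp only [List.mem_singleton, Prod.mk.injEq] at hm'
      exact Or.inr ⟨by omega, hm'.1⟩
  · rintro (hx | ⟨hv, rfl⟩)
    · obtain ⟨c, hm, he⟩ := (pv_mem_pvExt v x l).mp hx
      exact ⟨c, List.mem_append_left _ hm, he⟩
    · exact ⟨1, List.mem_append_right _ (by simp), by omega⟩

theorem pv_ext_sub_keys {v x : Int} {l : List (Int × Int)} (h : x ∈ pvExt v l) :
    x ∈ l.map (·.1) := by
  obtain ⟨c, hm, -⟩ := (pv_mem_pvExt v x l).mp h
  exact List.mem_map_of_mem hm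

theorem pv_inv_step (compressed : List Bool) (p : Int × Int) (a : PySem.Dict Int Int × PySem.Dict Int Int)
    (b : pvBSt) (h : pvInv a b) : pvInv (pvAStep compressed a p) (pvBStep compressed b p) := by
  obtain ⟨dA, rA⟩ := a
  obtain ⟨dB, rB, E, C⟩ := b
  obtain ⟨hbd, hbr, hnd, hcnt, hE, hC⟩ := h
  dsimp only at hbd hbr hnd hcnt hE hC
  subst hbd hbr
  by_cases hcmp : (PySem.List.pyGet? compressed p.1).getD false = true
  · unfold pvAStep pvBStep
    rw [if_pos hcmp, if_pos hcmp]
    exact ⟨rfl, rfl, hnd, hcnt, hE, hC⟩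
  · have hndI : (dB.items.map (·.1)).Nodup := hnd
    set tile := p.2 with htile
    set I0 := dB.items with hI0
    set st2 := I0.foldl (pvAInner tile) (dB, rB) with hst2def
    obtain ⟨hA1, hA2⟩ := pvAInner_fold tile I0 [] dB rB (by simpa [hI0] using hndI) (by simp [hI0])
    rw [List.map_nil, List.nil_append] at hA1
    have hAred : pvAStep compressed (dB, rB) p = (st2.1.setdefault tile 1, st2.2) := by
      unfold pvAStep
      rw [if_neg hcmp]
    set L := E.getD tile [] with hLdef
    set ie := L.foldl pvBExt (dB, E.erase tile) with hiedef
    set rng' := (if C.getD tile 0 ≠ 0 then rB.insert tile (rB.getD tile 0 + C.getD tile 0) else rB)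
      with hrngdef
    set cover' := (if L ≠ [] then C.insert tile (C.getD tile 0 + (L.length : Int)) else C)
      with hcovdef
    have hBred : pvBStep compressed (dB, rB, E, C) p =
        (if ie.1.contains tile = false then
          (ie.1.insert tile 1, rng', ie.2.insert (tile + 1) (ie.2.getD (tile + 1) [] ++ [tile]),
            cover'.insert tile (cover'.getD tile 0 + 1))
         else (ie.1, rng', ie.2, cover')) := by
      unfold pvBStep
      rw [if_neg hcmp]
    -- facts about L
    have hLnd : L.Nodup := (hE tile).1
    have hLmem : ∀ x, x ∈ L ↔ x ∈ pvExt tile I0 := (hE tile).2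
    have hLget : ∀ x ∈ L, dB.get? x = some (tile - x) := by
      intro x hx
      obtain ⟨c, hm, he⟩ := (pv_mem_pvExt tile x I0).mp ((hLmem x).mp hx)
      have hce : c = tile - x := by omega
      subst hce
      exact PySem.Dict.get?_of_mem_items _ hm hnd
    have hLlen : L.length = (pvExt tile I0).length :=
      (((List.perm_ext_iff_of_nodup hLnd (pvExt_nodup tile I0 hndI)).mpr hLmem)).length_eq
    obtain ⟨hB1, hB2⟩ := pvBExt_fold tile L dB (E.erase tile) hLnd hnd hLget
    -- B's inc equals A's inc
    have hincs : ie.1.items = I0.map (pvRun tile) := by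
      rw [hiedef, hB1]
      apply List.map_congr_left
      rintro ⟨b1, c1⟩ hm
      by_cases hbL : b1 ∈ L
      · obtain ⟨c', hm', he'⟩ := (pv_mem_pvExt tile b1 I0).mp ((hLmem b1).mp hbL)
        have : ((b1, c') : Int × Int) = (b1, c1) := pv_fst_eq I0 hndI hm' hm rfl
        injection this with _ hcc
        subst hcc
        simp [pvRun, hbL, ← he']
      · have hne : tile ≠ b1 + c1 :=
          fun he => hbL ((hLmem b1).mpr ((pv_mem_pvExt tile b1 I0).mpr ⟨c1, hm, he⟩))
        simp [pvRun, hbL, hne]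
    have hsame1 : ie.1 = st2.1 := PySem.Dict.ext (by rw [hincs, hA1])
    -- rng equality
    have hrng : rng' = st2.2 := by
      rw [hA2, hrngdef, hC tile]
      unfold pvRngUpd
      by_cases h0 : pvHits tile I0 = 0
      · simp [h0]
      · rw [if_pos (Int.natCast_ne_zero.mpr h0), if_neg h0]
    -- contains transfer
    have hconteq : st2.1.contains tile = dB.contains tile := by
      unfold PySem.Dict.contains
      rw [hA1, List.any_map]
      congr 1
      funext a
      simp only [Function.comp_apply, pvRun_fst]
    have hM := hE (tile + 1)
    have hie2 : ∀ v : Int, ie.2.getD v [] =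
        (if v = tile then [] else if v = tile + 1 then E.getD (tile + 1) [] ++ L
         else E.getD v []) := by
      intro v
      rw [hiedef] at *
      by_cases hL0 : L = []
      · rw [hB2, if_pos hL0, pv_getD_erase, hL0, List.append_nil]
        split_ifs with h1 h2
        · rfl
        · rw [h2]
        · rfl
      · rw [hB2, if_neg hL0, PySem.Dict.getD_insert, pv_getD_erase, pv_getD_erase]
        by_cases h2 : v = tile + 1
        · rw [if_pos h2, if_neg (by omega), if_pos h2, if_neg (by omega)]
        · rw [if_neg h2, if_neg h2]
    have hdisjML : ∀ x : Int, x ∈ pvExt (tile + 1) I0 → x ∈ pvExt tile I0 → False := by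
      intro x h1 h2
      obtain ⟨c1, hm1, he1⟩ := (pv_mem_pvExt _ x I0).mp h1
      obtain ⟨c2, hm2, he2⟩ := (pv_mem_pvExt _ x I0).mp h2
      have := pv_fst_eq I0 hndI hm1 hm2 rfl
      injection this with _ hcc
      omega
    have hextnodup : (E.getD (tile + 1) [] ++ L).Nodup :=
      List.Nodup.append hM.1 hLnd
        (List.disjoint_left.mpr (by
          intro x hx1 hx2
          exact hdisjML x ((hM.2 x).mp hx1) ((hLmem x).mp hx2)))
    rw [hAred, hBred]
    by_cases hct : st2.1.contains tile = true
    · rw [if_neg (by rw [hsame1, hct]; simp), PySem.Dict.setdefault_of_contains _ _ hct]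
      have hkeys1 : st2.1.keys = I0.map (·.1) := by
        show st2.1.items.map (·.1) = _
        rw [hA1, pv_map_fst_map_run]
      refine ⟨hsame1, hrng, ?_, ?_, ?_, ?_⟩
      · rw [hkeys1]
        exact hndI
      · intro bc hbc
        rw [hA1] at hbc
        obtain ⟨a, ha, rfl⟩ := List.mem_map.mp hbc
        have := hcnt a ha
        unfold pvRun
        split
        · simp only
          omega
        · exact this
      · intro v
        dsimp only
        rw [hie2 v, hA1]
        by_cases hvt : v = tile
        · subst hvt
          rw [if_pos rfl]
          refine ⟨List.nodup_nil, fun x => ?_⟩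
          rw [pv_mem_ext_map]
          simp only [List.not_mem_nil, false_iff]
          rintro (⟨hne, -⟩ | ⟨habs, -⟩)
          · exact hne rfl
          · omega
        · rw [if_neg hvt]
          by_cases hvt1 : v = tile + 1
          · subst hvt1
            rw [if_pos rfl]
            refine ⟨hextnodup, fun x => ?_⟩
            rw [pv_mem_ext_map, List.mem_append]
            constructor
            · rintro (hx | hx)
              · exact Or.inl ⟨by omega, (hM.2 x).mp hx⟩
              · exact Or.inr ⟨rfl, (hLmem x).mp hx⟩
            · rintro (⟨-, hx⟩ | ⟨-, hx⟩)
              · exact Or.inl ((hM.2 x).mpr hx)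
              · exact Or.inr ((hLmem x).mpr hx)
          · rw [if_neg hvt1]
            refine ⟨(hE v).1, fun x => ?_⟩
            rw [pv_mem_ext_map]
            constructor
            · intro hx
              exact Or.inl ⟨hvt, ((hE v).2 x).mp hx⟩
            · rintro (⟨-, hx⟩ | ⟨hv1, -⟩)
              · exact ((hE v).2 x).mpr hx
              · exact absurd hv1 hvt1
      · intro v
        dsimp only
        rw [hA1, pvHits_map v tile I0 hcnt]
        by_cases hvt : v = tile
        · subst hvt
          rw [if_pos rfl, hcovdef]
          by_cases hL0 : L = []
          · rw [if_neg (by simp [hL0]), hC tile, ← hLlen, hL0]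
            simp
          · rw [if_pos hL0, PySem.Dict.getD_insert_self, hC tile, hLlen]
            push_cast
            ring
        · rw [if_neg hvt, hcovdef]
          have hCv : cover'.getD v 0 = C.getD v 0 := by
            rw [hcovdef]
            split
            · rw [PySem.Dict.getD_insert, if_neg hvt]
            · rfl
          rw [← hcovdef, hCv, hC v]
          simp
    · have hct' : st2.1.contains tile = false := by revert hct; cases st2.1.contains tile <;> simp
      rw [if_pos (by rw [hsame1, hct']), PySem.Dict.setdefault_of_not_contains _ _ hct']
      have hdbc : dB.contains tile = false := by rw [← hconteq]; exact hct'
      have htn : tile ∉ I0.map (·.1) := by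
        intro hm
        have hcontra : dB.contains tile = true := (PySem.Dict.contains_iff_mem_keys dB tile).mpr hm
        rw [hdbc] at hcontra
        cases hcontra
      have hAit : (st2.1.insert tile 1).items = I0.map (pvRun tile) ++ [(tile, 1)] := by
        rw [PySem.Dict.items_insert_of_not_contains _ _ hct', hA1]
      have hkeys1 : st2.1.keys = I0.map (·.1) := by
        show st2.1.items.map (·.1) = _
        rw [hA1, pv_map_fst_map_run]
      have hie2' : ∀ v : Int,
          (ie.2.insert (tile + 1) (ie.2.getD (tile + 1) [] ++ [tile])).getD v [] =
          (if v = tile then [] else if v = tile + 1 then (E.getD (tile + 1) [] ++ L) ++ [tile]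
           else E.getD v []) := by
        intro v
        rw [PySem.Dict.getD_insert]
        by_cases hv1 : v = tile + 1
        · rw [if_pos hv1, hie2 (tile + 1), if_neg (by omega), if_pos rfl, if_neg (by omega),
            if_pos hv1]
        · rw [if_neg hv1, hie2 v]
          simp only [if_neg hv1]
      have htnM : tile ∉ E.getD (tile + 1) [] ++ L := by
        intro hm
        rcases List.mem_append.mp hm with hm' | hm'
        · exact htn (pv_ext_sub_keys ((hM.2 tile).mp hm'))
        · exact htn (pv_ext_sub_keys ((hLmem tile).mp hm'))
      refine ⟨by rw [hsame1], hrng, ?_, ?_, ?_, ?_⟩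
      · have : (st2.1.insert tile 1).keys = I0.map (·.1) ++ [tile] := by
          rw [PySem.Dict.keys_insert_of_not_contains _ _ hct', hkeys1]
        rw [this]
        refine List.Nodup.append hndI (List.nodup_singleton tile) ?_
        rw [List.disjoint_left]
        intro x hx hx'
        rw [List.mem_singleton] at hx'
        exact htn (hx' ▸ hx)
      · intro bc hbc
        rw [hAit] at hbc
        rcases List.mem_append.mp hbc with hm | hm
        · obtain ⟨a, ha, rfl⟩ := List.mem_map.mp hm
          have := hcnt a ha
          unfold pvRun
          split
          · simp only
            omega
          · exact this
        · rw [List.mem_singleton] at hm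
          rw [hm]
      · intro v
        dsimp only
        rw [hie2' v, hAit]
        by_cases hvt : v = tile
        · subst hvt
          rw [if_pos rfl]
          refine ⟨List.nodup_nil, fun x => ?_⟩
          rw [pv_mem_ext_append, pv_mem_ext_map]
          simp only [List.not_mem_nil, false_iff]
          rintro ((⟨hne, -⟩ | ⟨habs, -⟩) | ⟨habs, -⟩)
          · exact hne rfl
          · omega
          · omega
        · rw [if_neg hvt]
          by_cases hvt1 : v = tile + 1
          · subst hvt1
            rw [if_pos rfl]
            refine ⟨List.Nodup.append hextnodup (List.nodup_singleton tile) ?_, fun x => ?_⟩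
            · rw [List.disjoint_left]
              intro x hx hx'
              rw [List.mem_singleton] at hx'
              exact htnM (hx' ▸ hx)
            · rw [pv_mem_ext_append, pv_mem_ext_map, List.mem_append, List.mem_append,
                List.mem_singleton]
              constructor
              · rintro ((hx | hx) | hx)
                · exact Or.inl (Or.inl ⟨by omega, (hM.2 x).mp hx⟩)
                · exact Or.inl (Or.inr ⟨rfl, (hLmem x).mp hx⟩)
                · exact Or.inr ⟨rfl, hx⟩
              · rintro ((⟨-, hx⟩ | ⟨-, hx⟩) | ⟨-, hx⟩)
                · exact Or.inl (Or.inl ((hM.2 x).mpr hx))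
                · exact Or.inl (Or.inr ((hLmem x).mpr hx))
                · exact Or.inr hx
          · rw [if_neg hvt1]
            refine ⟨(hE v).1, fun x => ?_⟩
            rw [pv_mem_ext_append, pv_mem_ext_map]
            constructor
            · intro hx
              exact Or.inl (Or.inl ⟨hvt, ((hE v).2 x).mp hx⟩)
            · rintro ((⟨-, hx⟩ | ⟨hv1, -⟩) | ⟨hv1, -⟩)
              · exact ((hE v).2 x).mpr hx
              · exact absurd hv1 hvt1
              · exact absurd hv1 hvt1
      · intro v
        dsimp only
        rw [hAit, pvHits_append_new, pvHits_map v tile I0 hcnt, PySem.Dict.getD_insert]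
        by_cases hvt : v = tile
        · subst hvt
          rw [if_pos rfl, if_pos rfl, if_pos rfl, hcovdef]
          by_cases hL0 : L = []
          · rw [if_neg (by simp [hL0]), hC tile, ← hLlen, hL0]
            simp
          · rw [if_pos hL0, PySem.Dict.getD_insert_self, hC tile, hLlen]
            push_cast
            ring
        · rw [if_neg hvt, if_neg hvt, if_neg hvt, hcovdef]
          have hCv : (if L ≠ [] then C.insert tile (C.getD tile 0 + (L.length : Int))
              else C).getD v 0 = C.getD v 0 := by
            split
            · rw [PySem.Dict.getD_insert, if_neg hvt]
            · rfl
          rw [hCv, hC v]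
          simp

theorem pv_inv_fold (compressed : List Bool) (l : List (Int × Int))
    (a : PySem.Dict Int Int × PySem.Dict Int Int) (b : pvBSt) (h : pvInv a b) :
    pvInv (l.foldl (pvAStep compressed) a) (l.foldl (pvBStep compressed) b) := by
  induction l generalizing a b with
  | nil => exact h
  | cons x xs ih => exact ih _ _ (pv_inv_step compressed x a b h)

-- ===== VERDICT (by name: the statement is the Claim_ definition above) =====
theorem get_tile_counts_py_spec : Claim_equal_get_tile_counts_py := by
  intro tiles compressed _ _
  unfold Spec_get_tile_counts_py get_tile_counts_py get_tile_counts_py_alt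
  have h0 : pvInv (PySem.Dict.empty, PySem.Dict.empty)
      (PySem.Dict.empty, PySem.Dict.empty, PySem.Dict.empty, PySem.Dict.empty) := by
    refine ⟨rfl, rfl, ?_, ?_, ?_, ?_⟩ <;> simp [PySem.Dict.empty, PySem.Dict.keys, PySem.Dict.getD,
      PySem.Dict.get?, pvExt, pvHits]
  have h := pv_inv_fold compressed (PySem.List.enumerate tiles)
    (PySem.Dict.empty, PySem.Dict.empty) _ h0
  obtain ⟨h1, h2, -⟩ := h
  simp [h1, h2]
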